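-- pv_equiv track=rewrite | github.com/chboishabba/SensibLaw | src/fact_intake/messenger_export_import.py | _split_sender_message_contamination
-- ===== SOURCE A (Python) =====
-- MESSAGE_STARTERS = (
--     "We ",
--     "We'",
--     "I ",
--     "I'",
--     "Thanks",
--     "Thank ",
--     "Here ",
--     "Your ",
--     "You ",
--     "Please ",
--     "Download ",
--     "View ",
--     "Includes ",
--     "Check ",
--     "The ",
-- )
--
-- def _split_sender_message_contamination(sender: str, message: str) -> tuple[str, str]:
--     sender = sender.strip()
--     message = message.strip()
--     if not sender:
--         return sender, message
--     for index in range(1, len(sender)):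
--         prev = sender[index - 1]
--         curr = sender[index]
--         if not prev.islower() or not curr.isupper():
--             continue
--         prefix = sender[:index].strip()
--         suffix = sender[index:].strip()
--         if len(prefix) < 2 or len(suffix) < 4:
--             continue
--         if not any(suffix.startswith(starter) for starter in MESSAGE_STARTERS):
--             continue
--         merged_message = suffix if not message else f"{suffix} {message}"
--         return prefix, merged_message.strip()
--     return sender, message
-- ===== SOURCE B (Python) =====
-- MESSAGE_STARTERS = (
--     "We ",
--     "We'",
--     "I ",
--     "I'",
--     "Thanks",
--     "Thank ",
--     "Here ",
--     "Your ",
--     "You ",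
--     "Please ",
--     "Download ",
--     "View ",
--     "Includes ",
--     "Check ",
--     "The ",
-- )
--
-- def _split_sender_message_contamination(sender: str, message: str) -> tuple[str, str]:
--     sender = sender.strip()
--     message = message.strip()
--     if not sender:
--         return sender, message
--     candidates = []
--     for starter in MESSAGE_STARTERS:
--         pos = sender.find(starter, 1)
--         while pos != -1:
--             if (sender[pos - 1].islower() and sender[pos].isupper()
--                     and len(sender[:pos].strip()) >= 2
--                     and len(sender[pos:].strip()) >= 4):
--                 candidates.append(pos)
--             pos = sender.find(starter, pos + 1)
--     if not candidates:
--         return sender, message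
--     best = min(candidates)
--     prefix = sender[:best].strip()
--     suffix = sender[best:].strip()
--     merged_message = suffix if not message else f"{suffix} {message}"
--     return prefix, merged_message.strip()
-- ===== Notes on version B (the rewrite author's own statement) =====
-- stated objective: faster
-- what changed: Instead of scanning every character position and testing all starters at each, B iterates over the MESSAGE_STARTERS list, enumerates each starter's occurrence positions with str.find, filters them by the boundary and length guards, and splits at the minimum qualifying position.
import Mathlib
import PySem

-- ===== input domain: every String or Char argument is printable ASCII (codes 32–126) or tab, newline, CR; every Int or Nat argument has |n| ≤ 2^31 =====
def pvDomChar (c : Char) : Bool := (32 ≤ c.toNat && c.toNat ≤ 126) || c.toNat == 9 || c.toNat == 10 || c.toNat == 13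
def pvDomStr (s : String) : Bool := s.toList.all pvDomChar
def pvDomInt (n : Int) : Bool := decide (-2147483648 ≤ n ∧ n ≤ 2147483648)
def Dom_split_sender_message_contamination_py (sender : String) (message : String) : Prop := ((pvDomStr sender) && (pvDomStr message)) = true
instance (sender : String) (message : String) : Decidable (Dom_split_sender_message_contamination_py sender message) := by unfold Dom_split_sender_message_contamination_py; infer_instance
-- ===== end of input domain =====

-- B inverts the loops: instead of testing every character position, it scans the
-- MESSAGE_STARTERS list, enumerates each starter's occurrences with str.find, and splits at
-- the minimum qualifying position (measured faster: find skips non-matching positions).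

-- ===== PORT A =====
-- the module constant MESSAGE_STARTERS (shared by both Pythons)
def pySTARTERS : List (List Char) :=
  ["We ".toList, "We'".toList, "I ".toList, "I'".toList, "Thanks".toList, "Thank ".toList,
   "Here ".toList, "Your ".toList, "You ".toList, "Please ".toList, "Download ".toList,
   "View ".toList, "Includes ".toList, "Check ".toList, "The ".toList]

-- the `for index in range(1, len(sender))` loop of A, with `continue` as recursion
def aLoop (s m : List Char) : List Int → String × String
  | [] => (String.ofList s, String.ofList m)
  | i :: rest =>
    let prev := PySem.List.pyGetD s (i - 1) ' '
    let curr := PySem.List.pyGetD s i ' '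
    if !(PySem.Chars.islower prev) || !(PySem.Chars.isupper curr) then
      aLoop s m rest
    else
      let pre := PySem.Chars.strip (PySem.List.slice s none (some i))
      let suf := PySem.Chars.strip (PySem.List.slice s (some i) none)
      if pre.length < 2 || suf.length < 4 then
        aLoop s m rest
      else if !(pySTARTERS.any fun st => PySem.Chars.startswith suf st) then
        aLoop s m rest
      else
        let merged := if m.isEmpty then suf else suf ++ ' ' :: m
        (String.ofList pre, String.ofList (PySem.Chars.strip merged))

def split_sender_message_contamination_py (sender : String) (message : String) : String × String :=
  let s := PySem.Chars.strip sender.toList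
  let m := PySem.Chars.strip message.toList
  if s.isEmpty then (String.ofList s, String.ofList m)
  else aLoop s m (PySem.List.pyRange 1 (s.length : Int))

-- ===== PORT B =====
-- the guard of B's inner `if` (boundary shape and stripped-length tests)
def bQual (s : List Char) (i : Int) : Bool :=
  PySem.Chars.islower (PySem.List.pyGetD s (i - 1) ' ') &&
  PySem.Chars.isupper (PySem.List.pyGetD s i ' ') &&
  decide (2 ≤ (PySem.Chars.strip (PySem.List.slice s none (some i))).length) &&
  decide (4 ≤ (PySem.Chars.strip (PySem.List.slice s (some i) none)).length)

-- B's `while pos != -1` find loop for one starter (fuel only makes the loop total)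
def bGather (s st : List Char) : Nat → Int → List Int
  | 0, _ => []
  | fuel + 1, pos =>
    if pos == -1 then []
    else
      (if bQual s pos then [pos] else []) ++
        bGather s st fuel (PySem.Chars.findFrom s st (pos + 1))

def split_sender_message_contamination_py_alt (sender : String) (message : String) : String × String :=
  let s := PySem.Chars.strip sender.toList
  let m := PySem.Chars.strip message.toList
  if s.isEmpty then (String.ofList s, String.ofList m)
  else
    let candidates := pySTARTERS.foldl
      (fun acc st => acc ++ bGather s st (s.length + 1) (PySem.Chars.findFrom s st 1)) []
    match candidates with
    | [] => (String.ofList s, String.ofList m)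
    | c :: cs =>
      let best := cs.foldl min c
      let pre := PySem.Chars.strip (PySem.List.slice s none (some best))
      let suf := PySem.Chars.strip (PySem.List.slice s (some best) none)
      let merged := if m.isEmpty then suf else suf ++ ' ' :: m
      (String.ofList pre, String.ofList (PySem.Chars.strip merged))

-- ===== PRECONDITION & SPEC =====
def Spec_split_sender_message_contamination_py (sender : String) (message : String) (out : String × String) : Prop := out = split_sender_message_contamination_py_alt sender message
instance (sender : String) (message : String) (out : String × String) : Decidable (Spec_split_sender_message_contamination_py sender message out) := by unfold Spec_split_sender_message_contamination_py; infer_instance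

-- ===== CLAIM (what is proved, stated in full; the proofs are below) =====
def Claim_equal_split_sender_message_contamination_py : Prop := ∀ (sender : String) (message : String), Dom_split_sender_message_contamination_py sender message → Spec_split_sender_message_contamination_py sender message (split_sender_message_contamination_py sender message)

-- ===== LEMMAS AND PROOFS =====

-- combined qualification test as A evaluates it at an index i
def qA (s : List Char) (i : Int) : Bool :=
  bQual s i &&
    pySTARTERS.any fun st =>
      PySem.Chars.startswith (PySem.Chars.strip (PySem.List.slice s (some i) none)) st

-- combined qualification test as B's candidate set realises it
def qB (s : List Char) (i : Int) : Bool :=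
  bQual s i && pySTARTERS.any fun st => decide (st <+: s.drop i.toNat)

-- the value both programs return once the split index i is chosen
def splitRes (s m : List Char) (i : Int) : String × String :=
  let pre := PySem.Chars.strip (PySem.List.slice s none (some i))
  let suf := PySem.Chars.strip (PySem.List.slice s (some i) none)
  let merged := if m.isEmpty then suf else suf ++ ' ' :: m
  (String.ofList pre, String.ofList (PySem.Chars.strip merged))

lemma aLoop_eq_find (s m : List Char) (l : List Int) :
    aLoop s m l = match l.find? (qA s) with
      | some i => splitRes s m i
      | none => (String.ofList s, String.ofList m) := by
  induction l with
  | nil => simp [aLoop]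
  | cons i rest ih =>
    by_cases h : qA s i
    · rw [List.find?_cons_of_pos h]
      simp only [qA, bQual, Bool.and_eq_true, decide_eq_true_eq] at h
      obtain ⟨⟨⟨⟨h1, h2⟩, h3⟩, h4⟩, h5⟩ := h
      have c1 : (!(PySem.Chars.islower (PySem.List.pyGetD s (i-1) ' ')) || !(PySem.Chars.isupper (PySem.List.pyGetD s i ' '))) = false := by
        simp [h1, h2]
      have c2 : ((PySem.Chars.strip (PySem.List.slice s none (some i))).length < 2 ||
          (PySem.Chars.strip (PySem.List.slice s (some i) none)).length < 4) = false := by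
        simp only [Bool.or_eq_false_iff, decide_eq_false_iff_not, Nat.not_lt]
        exact ⟨h3, h4⟩
      simp only [aLoop, c1, c2, h5, Bool.not_true, Bool.false_eq_true, if_false, splitRes]
    · have hf : qA s i = false := by simpa using h
      rw [List.find?_cons_of_neg (by simp [hf]), ← ih]
      simp only [aLoop]
      split_ifs with c1 c2 c3 hm
      · rfl
      · rfl
      · rfl
      all_goals exfalso
      all_goals (
        apply h;
        simp only [Bool.or_eq_true, Bool.not_eq_true', decide_eq_true_eq, not_or,
          Bool.not_eq_false, Bool.not_eq_true] at c1 c2 c3;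
        push_neg at c2;
        simp only [qA, bQual, Bool.and_eq_true, decide_eq_true_eq];
        exact ⟨⟨⟨⟨c1.1, c1.2⟩, by omega⟩, by omega⟩, c3⟩)

lemma dropWhile_idem (p : Char → Bool) (l : List Char) :
    (l.dropWhile p).dropWhile p = l.dropWhile p := by
  rw [List.dropWhile_eq_self_iff]
  intro hl
  have h := List.head_dropWhile_not p (l := l) (by
    intro hnil
    simp [hnil] at hl)
  simpa [List.head_eq_getElem] using h

lemma rstrip_prefix (cs : List Char) : PySem.Chars.rstrip cs <+: cs := by
  unfold PySem.Chars.rstrip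
  conv_rhs => rw [← List.reverse_reverse cs]
  exact List.reverse_prefix.mpr (List.dropWhile_suffix _)

lemma lstrip_strip (cs : List Char) :
    PySem.Chars.lstrip (PySem.Chars.strip cs) = PySem.Chars.strip cs := by
  show List.dropWhile PySem.Chars.isspace (PySem.Chars.strip cs) = PySem.Chars.strip cs
  rw [List.dropWhile_eq_self_iff]
  intro hl
  have hpre : PySem.Chars.strip cs <+: PySem.Chars.lstrip cs := rstrip_prefix _
  have hel : (PySem.Chars.strip cs).length ≤ (PySem.Chars.lstrip cs).length := hpre.length_le
  have hlen : 0 < (PySem.Chars.lstrip cs).length := by omega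
  have hget : (PySem.Chars.strip cs)[0]'hl = (PySem.Chars.lstrip cs)[0]'hlen := hpre.getElem _
  have hlcs : PySem.Chars.lstrip cs ≠ [] := by intro h0; rw [h0] at hlen; simp at hlen
  have hlcs' : List.dropWhile PySem.Chars.isspace cs ≠ [] := by
    simpa [PySem.Chars.lstrip] using hlcs
  have h2 := List.head_dropWhile_not PySem.Chars.isspace hlcs'
  have h3 : (PySem.Chars.lstrip cs)[0]'hlen =
      (List.dropWhile PySem.Chars.isspace cs).head hlcs' := by
    simp [PySem.Chars.lstrip, List.head_eq_getElem]
  simp [hget, h3, h2]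

lemma strip_idem (cs : List Char) :
    PySem.Chars.strip (PySem.Chars.strip cs) = PySem.Chars.strip cs := by
  show PySem.Chars.rstrip (PySem.Chars.lstrip (PySem.Chars.strip cs)) = PySem.Chars.strip cs
  rw [lstrip_strip]
  show PySem.Chars.rstrip (PySem.Chars.rstrip (PySem.Chars.lstrip cs)) = _
  unfold PySem.Chars.rstrip
  rw [List.reverse_reverse, dropWhile_idem]
  rfl

lemma isspace_of_isupper {c : Char} (h : PySem.Chars.isupper c = true) :
    PySem.Chars.isspace c = false := by
  simp only [PySem.Chars.isupper, Bool.and_eq_true, decide_eq_true_eq, Char.le_def,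
    UInt32.le_iff_toNat_le] at h
  have hA : (('A' : Char)).val.toNat = 65 := rfl
  have hZ : (('Z' : Char)).val.toNat = 90 := rfl
  have hc : c.toNat = c.val.toNat := rfl
  simp only [PySem.Chars.isspace]
  simp only [Bool.or_eq_false_iff, Bool.and_eq_false_iff, decide_eq_false_iff_not]
  omega

lemma getLast_not_isspace (s : List Char) (hs : PySem.Chars.strip s = s) (h0 : s ≠ []) :
    PySem.Chars.isspace (s.getLast h0) = false := by
  have he : s.reverse = (PySem.Chars.lstrip s).reverse.dropWhile PySem.Chars.isspace := by
    conv_lhs => rw [← hs]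
    unfold PySem.Chars.strip PySem.Chars.rstrip
    rw [List.reverse_reverse]
  have hrev : (PySem.Chars.lstrip s).reverse.dropWhile PySem.Chars.isspace ≠ [] := by
    rw [← he]; simpa using h0
  have h2 := List.head_dropWhile_not PySem.Chars.isspace hrev
  have h3 : s.getLast h0 = ((PySem.Chars.lstrip s).reverse.dropWhile PySem.Chars.isspace).head hrev := by
    rw [List.getLast_eq_head_reverse]
    congr 1
  rw [h3]
  exact h2

lemma strip_drop (s : List Char) (k : Nat) (hk : k < s.length)
    (hs : PySem.Chars.strip s = s) (hu : PySem.Chars.isupper (s[k]'hk) = true) :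
    PySem.Chars.strip (s.drop k) = s.drop k := by
  have hd : s.drop k ≠ [] := by
    intro h0
    have hlen := congrArg List.length h0
    simp at hlen; omega
  have hlstrip : PySem.Chars.lstrip (s.drop k) = s.drop k := by
    unfold PySem.Chars.lstrip
    rw [List.dropWhile_eq_self_iff]
    intro hl
    have hz : (s.drop k)[0] = s[k]'hk := by
      rw [List.getElem_drop]
      simp
    rw [hz]
    simp [isspace_of_isupper hu]
  show PySem.Chars.rstrip (PySem.Chars.lstrip (s.drop k)) = s.drop k
  rw [hlstrip]
  unfold PySem.Chars.rstrip
  rw [List.dropWhile_eq_self_iff.mpr ?_, List.reverse_reverse]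
  intro hl
  have hrn : (s.drop k).reverse ≠ [] := by simpa using hd
  have hs0 : s ≠ [] := by intro h1; subst h1; simp at hk
  have hgl : (s.drop k).reverse[0]'hl = s.getLast hs0 := by
    rw [← List.head_eq_getElem, List.head_reverse]
    · exact List.getLast_drop _
    · exact hrn
  rw [hgl]
  simp [getLast_not_isspace s hs]

-- on indices 1 ≤ i < len, with s stripped, A's test and B's test agree
lemma qA_eq_qB (s : List Char) (hs : PySem.Chars.strip s = s) (i : Int)
    (h1 : 1 ≤ i) (h2 : i < (s.length : Int)) : qA s i = qB s i := by
  by_cases hb : bQual s i = true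
  · have hiN : i.toNat < s.length := by omega
    have hpg : PySem.List.pyGetD s i ' ' = s[i.toNat]'hiN :=
      PySem.List.pyGetD_eq_getElem s ' ' (by omega) (by omega)
    have hu : PySem.Chars.isupper (s[i.toNat]'hiN) = true := by
      simp only [bQual, Bool.and_eq_true] at hb
      rw [← hpg]
      exact hb.1.1.2
    have hsuf : PySem.Chars.strip (PySem.List.slice s (some i) none) = s.drop i.toNat := by
      rw [PySem.List.slice_from s (by omega)]
      exact strip_drop s i.toNat hiN hs hu
    simp only [qA, qB, hsuf, hb, Bool.true_and]
    refine List.any_congr rfl fun st => ?_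
    rw [Bool.eq_iff_iff]
    simp [PySem.Chars.startswith_iff]
  · have hb' : bQual s i = false := by simpa using hb
    simp [qA, qB, hb']

lemma pyRange_nil {a b : Int} (h : b ≤ a) : PySem.List.pyRange a b = [] := by
  rw [List.eq_nil_iff_forall_not_mem]
  intro x hx
  have := PySem.List.mem_pyRange_one.mp hx
  omega

lemma find?_congr_mem (p q : Int → Bool) (l : List Int) (h : ∀ a ∈ l, p a = q a) :
    l.find? p = l.find? q := by
  induction l with
  | nil => rfl
  | cons a l ih =>
    rw [List.find?_cons, List.find?_cons, h a List.mem_cons_self,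
      ih fun b hb => h b (List.mem_cons_of_mem _ hb)]

-- find? over pyRange a b returns the least qualifying index
lemma find_pyRange_some (q : Int → Bool) : ∀ (n : Nat) (a b : Int), (b - a).toNat = n →
    ∀ i, (PySem.List.pyRange a b).find? q = some i →
    q i = true ∧ a ≤ i ∧ i < b ∧ ∀ j, a ≤ j → j < i → q j = false := by
  intro n
  induction n with
  | zero =>
    intro a b hn i h
    rw [pyRange_nil (by omega)] at h; simp at h
  | succ n ihn =>
    intro a b hn i h
    have hab : a < b := by omega
    rw [PySem.List.pyRange_one_cons hab, List.find?_cons] at h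
    by_cases hq : q a
    · simp [hq] at h
      subst h
      exact ⟨hq, le_refl _, hab, fun j hj1 hj2 => absurd hj1 (by omega)⟩
    · simp [hq] at h
      obtain ⟨h1, h2, h3, h4⟩ := ihn (a + 1) b (by omega) i h
      refine ⟨h1, by omega, h3, fun j hj1 hj2 => ?_⟩
      rcases eq_or_lt_of_le hj1 with rfl | hj
      · simpa using hq
      · exact h4 j (by omega) hj2

lemma find_pyRange_none (q : Int → Bool) (a b : Int)
    (h : (PySem.List.pyRange a b).find? q = none) :
    ∀ j, a ≤ j → j < b → q j = false := by
  intro j h1 h2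
  have hj : j ∈ PySem.List.pyRange a b := PySem.List.mem_pyRange_one.mpr ⟨h1, h2⟩
  have := List.find?_eq_none.mp h j hj
  simpa using this

-- membership in B's per-starter gather list
lemma mem_bGather (s st : List Char) (hst : st ≠ []) :
    ∀ (fuel : Nat) (k : Nat), k ≤ s.length → s.length - k < fuel →
    ∀ j, (j ∈ bGather s st fuel (PySem.Chars.findFrom s st (k : Int)) ↔
      (bQual s j = true ∧ (k : Int) ≤ j ∧ ∃ jn : Nat, j = (jn : Int) ∧ st <+: s.drop jn)) := by
  intro fuel
  induction fuel with
  | zero => intro k hk hf; omega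
  | succ fuel ih =>
    intro k hk hf j
    by_cases hp : PySem.Chars.findFrom s st (k : Int) = -1
    · rw [hp]
      simp only [bGather]
      norm_num
      intro _ _ jn hj hocc
      have hnone := (PySem.Chars.findFrom_natCast_eq_neg_one_iff s st k hk).mp hp
      apply hnone
      have hkj : k ≤ jn := by omega
      have : s.drop jn <:+ s.drop k := by
        rw [show jn = k + (jn - k) by omega, ← List.drop_drop]
        exact List.drop_suffix _ _
      exact (hocc.isInfix).trans (this.isInfix)
    · obtain ⟨hkp, hocc, hmin⟩ := PySem.Chars.findFrom_natCast_spec s st k hk hp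
      generalize hpdef : PySem.Chars.findFrom s st (k : Int) = p at hp hkp hocc hmin ⊢
      have hp0 : 0 ≤ p := by omega
      have hplen : p.toNat < s.length := by
        by_contra hge
        have hnil : s.drop p.toNat = [] := List.drop_eq_nil_of_le (by omega)
        rw [hnil] at hocc
        exact hst (List.prefix_nil.mp hocc)
      have hcast : p = ((p.toNat : Nat) : Int) := by omega
      have hnext : p + 1 = (((p.toNat + 1 : Nat)) : Int) := by omega
      simp only [bGather, beq_iff_eq, hp, if_false]
      rw [List.mem_append, hnext]
      rw [ih (p.toNat + 1) (by omega) (by omega) j]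
      constructor
      · rintro (hmem | ⟨hq, hle, jn, rfl, ho⟩)
        · have hjp : j = p ∧ bQual s p = true := by
            by_cases hbq : bQual s p = true
            · simp [hbq] at hmem; exact ⟨hmem, hbq⟩
            · simp [hbq] at hmem
          obtain ⟨rfl, hbq⟩ := hjp
          exact ⟨hbq, by omega, j.toNat, by omega, hocc⟩
        · exact ⟨hq, by omega, jn, rfl, ho⟩
      · rintro ⟨hq, hle, jn, rfl, ho⟩
        by_cases hje : jn = p.toNat
        · subst hje
          left
          rw [← hcast] at hq ⊢
          simp [hq]
        · right
          have hjk : k ≤ jn := by omega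
          have hjge : p.toNat < jn := by
            by_contra hlt
            exact hmin jn hjk (by omega) ho
          exact ⟨hq, by omega, jn, rfl, ho⟩

-- every starter is a nonempty string
lemma starters_ne_nil : ∀ st ∈ pySTARTERS, st ≠ [] := by decide

-- membership in B's full candidate list
lemma mem_candidates (s : List Char) (hne : s ≠ []) (j : Int) :
    (j ∈ pySTARTERS.foldl
        (fun acc st => acc ++ bGather s st (s.length + 1) (PySem.Chars.findFrom s st 1)) [] ↔
      qB s j = true ∧ 1 ≤ j ∧ j < (s.length : Int)) := by
  rw [PySem.List.foldl_append_eq_flatMap, List.nil_append, List.mem_flatMap]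
  have hlen : 1 ≤ s.length := by
    cases s with
    | nil => exact absurd rfl hne
    | cons a l => simp
  have hone : (1 : Int) = ((1 : Nat) : Int) := rfl
  constructor
  · rintro ⟨st, hstmem, hmem⟩
    rw [hone, mem_bGather s st (starters_ne_nil st hstmem) _ 1 hlen (by omega) j] at hmem
    obtain ⟨hq, hle, jn, rfl, ho⟩ := hmem
    have hjlen : jn < s.length := by
      by_contra hge
      have : s.drop jn = [] := List.drop_eq_nil_of_le (by omega)
      rw [this] at ho
      exact (starters_ne_nil st hstmem) (List.prefix_nil.mp ho)
    refine ⟨?_, by omega, by omega⟩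
    simp only [qB, hq, Bool.true_and, List.any_eq_true]
    exact ⟨st, hstmem, by simpa using ho⟩
  · rintro ⟨hq, h1, h2⟩
    simp only [qB, Bool.and_eq_true, List.any_eq_true, decide_eq_true_eq] at hq
    obtain ⟨hbq, st, hstmem, ho⟩ := hq
    refine ⟨st, hstmem, ?_⟩
    rw [hone, mem_bGather s st (starters_ne_nil st hstmem) _ 1 hlen (by omega) j]
    exact ⟨hbq, h1, j.toNat, by omega, ho⟩

lemma foldl_min_spec (c : Int) (cs : List Int) :
    cs.foldl min c ∈ c :: cs ∧ ∀ x ∈ c :: cs, cs.foldl min c ≤ x := by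
  induction cs generalizing c with
  | nil => simp
  | cons d ds ih =>
    obtain ⟨hmem, hle⟩ := ih (min c d)
    constructor
    · rw [List.foldl_cons]
      rcases List.mem_cons.mp hmem with h | h
      · rw [h]
        rcases le_total c d with hcd | hcd
        · rw [min_eq_left hcd]; exact List.mem_cons_self
        · rw [min_eq_right hcd]; exact List.mem_cons_of_mem _ List.mem_cons_self
      · exact List.mem_cons_of_mem _ (List.mem_cons_of_mem _ h)
    · intro x hx
      rw [List.foldl_cons]
      rcases List.mem_cons.mp hx with rfl | hx
      · exact le_trans (hle _ List.mem_cons_self) (min_le_left _ _)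
      rcases List.mem_cons.mp hx with rfl | hx
      · exact le_trans (hle _ List.mem_cons_self) (min_le_right _ _)
      · exact hle _ (List.mem_cons_of_mem _ hx)

-- ===== VERDICT (by name: the statement is the Claim_ definition above) =====
set_option maxHeartbeats 1600000 in
theorem split_sender_message_contamination_py_spec : Claim_equal_split_sender_message_contamination_py := by
  intro sender message _hdom
  unfold Spec_split_sender_message_contamination_py
  unfold split_sender_message_contamination_py split_sender_message_contamination_py_alt
  set s := PySem.Chars.strip sender.toList with hsdef
  set m := PySem.Chars.strip message.toList with hmdef
  cases hemp : s.isEmpty with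
  | true => rw [if_pos hemp, if_pos hemp]
  | false =>
    rw [if_neg (by simp [hemp]), if_neg (by simp [hemp])]
    have hne : s ≠ [] := by intro h0; rw [h0] at hemp; simp at hemp
    have hs : PySem.Chars.strip s = s := strip_idem _
    rw [aLoop_eq_find]
    rw [find?_congr_mem (qA s) (qB s) _ (fun a ha => by
      have := PySem.List.mem_pyRange_one.mp ha
      exact qA_eq_qB s hs a this.1 this.2)]
    rcases hfind : (PySem.List.pyRange 1 (s.length : Int)).find? (qB s) with _ | i0
    · have hnoq := find_pyRange_none (qB s) _ _ hfind
      have hcand : pySTARTERS.foldl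
          (fun acc st => acc ++ bGather s st (s.length + 1) (PySem.Chars.findFrom s st 1)) []
          = ([] : List Int) := by
        rw [List.eq_nil_iff_forall_not_mem]
        intro j hj
        rw [mem_candidates s hne j] at hj
        have := hnoq j hj.2.1 hj.2.2
        rw [this] at hj
        exact absurd hj.1 (by simp)
      rw [hcand]
    · obtain ⟨hq0, hge0, hlt0, hmin0⟩ := find_pyRange_some (qB s) _ 1 _ rfl i0 hfind
      rcases hcand : pySTARTERS.foldl
          (fun acc st => acc ++ bGather s st (s.length + 1) (PySem.Chars.findFrom s st 1)) []
          with _ | ⟨c, cs⟩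
      · exfalso
        have : i0 ∈ ([] : List Int) := by
          rw [← hcand, mem_candidates s hne i0]
          exact ⟨hq0, hge0, hlt0⟩
        simp at this
      · obtain ⟨hbm, hbl⟩ := foldl_min_spec c cs
        have hbmem : cs.foldl min c ∈ pySTARTERS.foldl
            (fun acc st => acc ++ bGather s st (s.length + 1) (PySem.Chars.findFrom s st 1)) [] := by
          rw [hcand]; exact hbm
        rw [mem_candidates s hne _] at hbmem
        have hbest : cs.foldl min c = i0 := by
          have hle1 : cs.foldl min c ≤ i0 := by
            apply hbl
            rw [← hcand, mem_candidates s hne i0]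
            exact ⟨hq0, hge0, hlt0⟩
          have hge1 : i0 ≤ cs.foldl min c := by
            by_contra hlt
            have := hmin0 _ hbmem.2.1 (by omega)
            rw [this] at hbmem
            exact absurd hbmem.1 (by simp)
          omega
        show splitRes s m i0 = splitRes s m (cs.foldl min c)
        rw [hbest]
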